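-- pv_equiv track=rewrite | github.com/hamletrannier/alphanumeric_sort | alphanumeric_sort.py | alphanumeric_sort
-- ===== SOURCE A (Python) =====
-- def alphanumeric_sort(value):
--     numbs = []
--     lowercase = []
--     uppercase = []
--     sort_list = []
--
--     for char in value:
--         if (char.islower()):
--             lowercase.append(char)
--
--         if (char.isnumeric()):
--             numbs.append(char)
--
--         if (char.isupper()):
--             uppercase.append(char)
--
--     sort_list.extend(sorted(numbs))
--
--     sort_list.extend(sorted(lowercase))
--
--     sort_list.extend(sorted(uppercase))
--
--     return ''.join(sort_list)
-- ===== SOURCE B (Python) =====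
-- RANK_WIDTH = 0x110000  # above every code point, so rank dominates the key
--
--
-- def _key(c):
--     if c.isnumeric():
--         rank = 0
--     elif c.islower():
--         rank = 1
--     else:
--         rank = 2
--     return rank * RANK_WIDTH + ord(c)
--
--
-- def alphanumeric_sort(value):
--     kept = [c for c in value if c.isnumeric() or c.islower() or c.isupper()]
--     return ''.join(sorted(kept, key=_key))
-- ===== Notes on version B (the rewrite author's own statement) =====
-- stated objective: simpler
-- what changed: One filtering pass plus a single keyed sort (rank*0x110000+ord as a scalar key) replaces A's three accumulator lists and three separate sorted() calls.
import Mathlib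
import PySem

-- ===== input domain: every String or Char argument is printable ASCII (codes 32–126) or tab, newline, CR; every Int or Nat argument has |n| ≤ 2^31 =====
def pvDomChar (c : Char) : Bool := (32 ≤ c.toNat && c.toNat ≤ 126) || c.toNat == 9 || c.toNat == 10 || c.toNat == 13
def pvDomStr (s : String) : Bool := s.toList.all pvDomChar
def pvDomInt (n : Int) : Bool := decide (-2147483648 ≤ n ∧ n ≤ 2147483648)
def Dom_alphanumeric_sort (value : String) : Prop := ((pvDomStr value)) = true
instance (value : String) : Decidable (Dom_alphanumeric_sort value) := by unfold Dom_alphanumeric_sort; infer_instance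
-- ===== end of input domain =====

-- B replaces A's three class lists with three separate sorts by one filtering pass and a
-- single keyed sort (simpler decomposition, same cost); char.isnumeric is ported as
-- PySem.Chars.isdigit, exact on the ASCII domain.

-- ===== PORT A =====
-- one loop filling three lists, then the three sorted lists concatenated;
-- ''.join over single chars is String.mk of the char list (exact)
def alphanumeric_sort (value : String) : String :=
  let st := value.toList.foldl
    (fun (acc : List Char × List Char × List Char) char =>
      let lowercase := if PySem.Chars.islower char then acc.2.1 ++ [char] else acc.2.1
      let numbs := if PySem.Chars.isdigit char then acc.1 ++ [char] else acc.1
      let uppercase := if PySem.Chars.isupper char then acc.2.2 ++ [char] else acc.2.2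
      (numbs, lowercase, uppercase))
    ([], [], [])
  String.mk (PySem.List.sorted st.1 (fun c => c) ++
             PySem.List.sorted st.2.1 (fun c => c) ++
             PySem.List.sorted st.2.2 (fun c => c))

-- ===== PORT B =====
-- _key from Source B: rank 0/1/2 times 0x110000 plus the code point
def pvKeyB (c : Char) : Nat :=
  (if PySem.Chars.isdigit c then 0
   else if PySem.Chars.islower c then 1
   else 2) * 0x110000 + c.toNat

def alphanumeric_sort_alt (value : String) : String :=
  let kept := value.toList.filter
    (fun c => PySem.Chars.isdigit c || PySem.Chars.islower c || PySem.Chars.isupper c)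
  String.mk (PySem.List.sorted kept pvKeyB)

-- ===== PRECONDITION & SPEC =====
def Spec_alphanumeric_sort (value : String) (out : String) : Prop := out = alphanumeric_sort_alt value
instance (value : String) (out : String) : Decidable (Spec_alphanumeric_sort value out) := by unfold Spec_alphanumeric_sort; infer_instance

-- ===== CLAIM (what is proved, stated in full; the proofs are below) =====
def Claim_equal_alphanumeric_sort : Prop := ∀ (value : String), Dom_alphanumeric_sort value → Spec_alphanumeric_sort value (alphanumeric_sort value)

-- ===== LEMMAS AND PROOFS =====

theorem char_toNat_lt (c : Char) : c.toNat < 0x110000 := by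
  show c.val.toNat < 0x110000
  rcases c.valid with h | ⟨h1, h2⟩ <;> omega

theorem pvKeyB_injective : Function.Injective pvKeyB := by
  intro a b h
  unfold pvKeyB at h
  have ha := char_toNat_lt a
  have hb := char_toNat_lt b
  have : a.toNat = b.toNat := by
    split_ifs at h <;> omega
  exact Char.eq_of_val_eq (by exact UInt32.toNat_inj.mp this)

-- A's loop over three accumulators computes the three filters
theorem foldA_eq (l : List Char) (n lo u : List Char) :
    l.foldl
      (fun (acc : List Char × List Char × List Char) char =>
        let lowercase := if PySem.Chars.islower char then acc.2.1 ++ [char] else acc.2.1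
        let numbs := if PySem.Chars.isdigit char then acc.1 ++ [char] else acc.1
        let uppercase := if PySem.Chars.isupper char then acc.2.2 ++ [char] else acc.2.2
        (numbs, lowercase, uppercase)) (n, lo, u)
    = (n ++ l.filter PySem.Chars.isdigit,
       lo ++ l.filter PySem.Chars.islower,
       u ++ l.filter PySem.Chars.isupper) := by
  induction l generalizing n lo u with
  | nil => simp
  | cons c t ih =>
    simp only [List.foldl_cons, List.filter_cons]
    rw [ih]
    split_ifs <;> simp

theorem digit_iff (c : Char) : PySem.Chars.isdigit c = true ↔ 48 ≤ c.toNat ∧ c.toNat ≤ 57 := by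
  simp only [PySem.Chars.isdigit, Bool.and_eq_true, decide_eq_true_eq, Char.le_def,
    UInt32.le_iff_toNat_le]
  constructor <;> intro ⟨h1, h2⟩ <;> exact ⟨by simpa using h1, by simpa using h2⟩

theorem lower_iff (c : Char) : PySem.Chars.islower c = true ↔ 97 ≤ c.toNat ∧ c.toNat ≤ 122 := by
  simp only [PySem.Chars.islower, Bool.and_eq_true, decide_eq_true_eq, Char.le_def,
    UInt32.le_iff_toNat_le]
  constructor <;> intro ⟨h1, h2⟩ <;> exact ⟨by simpa using h1, by simpa using h2⟩

theorem upper_iff (c : Char) : PySem.Chars.isupper c = true ↔ 65 ≤ c.toNat ∧ c.toNat ≤ 90 := by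
  simp only [PySem.Chars.isupper, Bool.and_eq_true, decide_eq_true_eq, Char.le_def,
    UInt32.le_iff_toNat_le]
  constructor <;> intro ⟨h1, h2⟩ <;> exact ⟨by simpa using h1, by simpa using h2⟩

theorem digit_not_lower {c : Char} (h : PySem.Chars.isdigit c = true) :
    PySem.Chars.islower c = false := by
  rw [digit_iff] at h
  rw [Bool.eq_false_iff, Ne, lower_iff]
  omega

theorem digit_not_upper {c : Char} (h : PySem.Chars.isdigit c = true) :
    PySem.Chars.isupper c = false := by
  rw [digit_iff] at h
  rw [Bool.eq_false_iff, Ne, upper_iff]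
  omega

theorem upper_not_lower {c : Char} (h : PySem.Chars.isupper c = true) :
    PySem.Chars.islower c = false := by
  rw [upper_iff] at h
  rw [Bool.eq_false_iff, Ne, lower_iff]
  omega

-- keys by class
theorem key_of_digit {c : Char} (h : PySem.Chars.isdigit c = true) :
    pvKeyB c = c.toNat := by simp [pvKeyB, h]

theorem key_of_lower {c : Char} (h : PySem.Chars.islower c = true) :
    pvKeyB c = 0x110000 + c.toNat := by
  have hd : PySem.Chars.isdigit c = false := by
    by_contra hc
    have := digit_not_lower (c := c) (by revert hc; cases PySem.Chars.isdigit c <;> simp)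
    simp [this] at h
  simp [pvKeyB, hd, h]

theorem key_of_upper {c : Char} (h : PySem.Chars.isupper c = true) :
    pvKeyB c = 2 * 0x110000 + c.toNat := by
  have hd : PySem.Chars.isdigit c = false := by
    by_contra hc
    have := digit_not_upper (c := c) (by revert hc; cases PySem.Chars.isdigit c <;> simp)
    simp [this] at h
  have hl : PySem.Chars.islower c = false := upper_not_lower h
  simp [pvKeyB, hd, hl]

-- the filter over the disjunction is a permutation of the three class filters
theorem filter_or_perm (l : List Char) :
    (l.filter (fun c => PySem.Chars.isdigit c || PySem.Chars.islower c || PySem.Chars.isupper c)).Perm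
      (l.filter PySem.Chars.isdigit ++ l.filter PySem.Chars.islower ++ l.filter PySem.Chars.isupper) := by
  induction l with
  | nil => simp
  | cons c t ih =>
    simp only [List.filter_cons]
    by_cases hd : PySem.Chars.isdigit c = true
    · simp only [hd, digit_not_lower hd, digit_not_upper hd, Bool.true_or, if_true,
        Bool.false_eq_true, ite_false, List.cons_append]
      exact ih.cons c
    · by_cases hl : PySem.Chars.islower c = true
      · have hu : PySem.Chars.isupper c = false := by
          by_contra hc
          have := upper_not_lower (c := c) (by revert hc; cases PySem.Chars.isupper c <;> simp)
          simp [this] at hl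
        simp only [hd, hl, hu, Bool.false_or, Bool.or_false, if_true, Bool.false_eq_true,
          ite_false]
        exact (ih.cons c).trans (by simpa using (List.perm_middle.symm.append_right
          (t.filter PySem.Chars.isupper)))
      · by_cases hu : PySem.Chars.isupper c = true
        · simp only [hd, hl, hu, Bool.false_or, Bool.or_true, if_true, Bool.false_eq_true,
            ite_false]
          exact (ih.cons c).trans List.perm_middle.symm
        · simp only [hd, hl, hu, Bool.or_self, Bool.false_or, Bool.false_eq_true, ite_false]
          exact ih

-- monotone id-sort order transfers to the key within a class
theorem pairwise_key_of_pairwise_le {l : List Char} (off : Nat)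
    (h : l.Pairwise (fun a b => a ≤ b))
    (hk : ∀ c ∈ l, pvKeyB c = off + c.toNat) :
    l.Pairwise (fun a b => pvKeyB a ≤ pvKeyB b) := by
  induction l with
  | nil => simp
  | cons c t ih =>
    rcases List.pairwise_cons.mp h with ⟨hc, ht⟩
    refine List.pairwise_cons.mpr ⟨?_, ih ht (fun x hx => hk x (List.mem_cons_of_mem _ hx))⟩
    intro b hb
    rw [hk c (List.mem_cons_self), hk b (List.mem_cons_of_mem _ hb)]
    have : c.toNat ≤ b.toNat := by
      have := hc b hb
      rw [Char.le_def] at this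
      exact this
    omega

theorem alphanumeric_sort_eq (value : String) :
    alphanumeric_sort value = alphanumeric_sort_alt value := by
  unfold alphanumeric_sort alphanumeric_sort_alt
  rw [foldA_eq]
  simp only
  congr 1
  set l := value.toList
  set N := l.filter PySem.Chars.isdigit with hN
  set L := l.filter PySem.Chars.islower with hL
  set U := l.filter PySem.Chars.isupper with hU
  apply PySem.List.eq_of_perm_of_pairwise_le_of_injective pvKeyB pvKeyB_injective
  · -- permutation
    refine ((((PySem.List.sorted_perm N _ _).append
        (PySem.List.sorted_perm L _ _)).append
        (PySem.List.sorted_perm U _ _)).trans ?_).trans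
        (PySem.List.sorted_perm _ pvKeyB false).symm
    exact (filter_or_perm l).symm
  · -- LHS pairwise by key
    have keyN : ∀ c ∈ PySem.List.sorted N (fun c => c) false, pvKeyB c = 0 + c.toNat := by
      intro c hc
      have : c ∈ N := (PySem.List.mem_sorted _ _ _ _).mp hc
      rw [key_of_digit (List.of_mem_filter this)]; omega
    have keyL : ∀ c ∈ PySem.List.sorted L (fun c => c) false, pvKeyB c = 0x110000 + c.toNat := by
      intro c hc
      have : c ∈ L := (PySem.List.mem_sorted _ _ _ _).mp hc
      exact key_of_lower (List.of_mem_filter this)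
    have keyU : ∀ c ∈ PySem.List.sorted U (fun c => c) false, pvKeyB c = 2 * 0x110000 + c.toNat := by
      intro c hc
      have : c ∈ U := (PySem.List.mem_sorted _ _ _ _).mp hc
      exact key_of_upper (List.of_mem_filter this)
    have pwN := pairwise_key_of_pairwise_le 0 (PySem.List.sorted_pairwise N (fun c => c)) keyN
    have pwL := pairwise_key_of_pairwise_le 0x110000 (PySem.List.sorted_pairwise L (fun c => c)) keyL
    have pwU := pairwise_key_of_pairwise_le (2 * 0x110000) (PySem.List.sorted_pairwise U (fun c => c)) keyU
    rw [List.pairwise_append]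
    refine ⟨List.pairwise_append.mpr ⟨pwN, pwL, ?_⟩, pwU, ?_⟩
    · intro a ha b hb
      rw [keyN a ha, keyL b hb]
      have := char_toNat_lt a
      omega
    · intro a ha b hb
      rcases List.mem_append.mp ha with h | h
      · rw [keyN a h, keyU b hb]
        have := char_toNat_lt a
        omega
      · rw [keyL a h, keyU b hb]
        have := char_toNat_lt a
        omega
  · -- RHS pairwise by key: it is a keyed sort
    exact PySem.List.sorted_pairwise _ pvKeyB

-- ===== VERDICT (by name: the statement is the Claim_ definition above) =====
theorem alphanumeric_sort_spec : Claim_equal_alphanumeric_sort := by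
  intro value _
  unfold Spec_alphanumeric_sort
  exact alphanumeric_sort_eq value
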